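-- pv_equiv track=rewrite | github.com/mrMustacho/topcoder-solutions | py/grafixCorrupt.py | selectWord
-- ===== SOURCE A (Python) =====
-- def selectWord(dictionary, candidate):
--     n = len(dictionary)
--     s = 0 #number of max similarities
--     temp = 0 #temp. num. of similarities
--     p = -1 #position of the similar word
--     for i in range(n): #dictionary position
--         for j in range(len(candidate)):
--             if candidate[j] == dictionary[i][j]:
--                 temp += 1
--         if temp > s:
--             s = temp
--             p = i
--         temp = 0
--     return p
-- ===== SOURCE B (Python) =====
-- def selectWord(dictionary, candidate):
--     def score(w):
--         s = 0
--         for j, ch in enumerate(candidate):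
--             if ch == w[j]:
--                 s += 1
--         return s
--
--     def best(lo, hi):
--         # best (index, score) over dictionary[lo:hi]; (-1, 0) if no positive score.
--         if hi - lo == 0:
--             return (-1, 0)
--         if hi - lo == 1:
--             sc = score(dictionary[lo])
--             return (lo, sc) if sc > 0 else (-1, 0)
--         mid = (lo + hi) // 2
--         li, ls = best(lo, mid)
--         ri, rs = best(mid, hi)
--         return (li, ls) if ls >= rs else (ri, rs)
--
--     return best(0, len(dictionary))[0]
-- ===== Notes on version B (the rewrite author's own statement) =====
-- stated objective: alternative
-- what changed: Replaces A's fused forward running-best loop (temp/s/p state machine) with a divide-and-conquer tournament: scores are computed per half, recursively reduced to a (best index, best score) pair with a left-biased merge, and -1/0 is the identity of the merge.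
import Mathlib
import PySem

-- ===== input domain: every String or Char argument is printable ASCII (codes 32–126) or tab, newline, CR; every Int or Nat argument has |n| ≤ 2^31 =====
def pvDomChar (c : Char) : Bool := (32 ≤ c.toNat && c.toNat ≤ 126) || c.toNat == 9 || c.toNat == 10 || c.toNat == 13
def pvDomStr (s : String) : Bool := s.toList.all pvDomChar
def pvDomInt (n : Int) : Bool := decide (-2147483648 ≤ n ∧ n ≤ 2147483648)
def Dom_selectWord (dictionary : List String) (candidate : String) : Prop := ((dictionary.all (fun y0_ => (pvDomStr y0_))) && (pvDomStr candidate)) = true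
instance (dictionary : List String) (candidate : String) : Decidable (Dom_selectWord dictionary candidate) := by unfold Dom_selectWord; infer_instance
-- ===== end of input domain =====

-- B replaces A's fused forward running-best loop by a divide-and-conquer tournament over dictionary halves with a left-biased merge (objective: alternative).


-- ===== PORT A =====
-- Literal port of A: outer loop over range(n) keeping the running state (s, p); inner loop over
-- range(len(candidate)) accumulating temp from 0. 'dictionary[i][j]' is the Option-composition of the
-- two pyGet?; a none (Python's IndexError, excluded by Pre_) compares unequal to the in-range
-- candidate character.
def selectWord (dictionary : List String) (candidate : String) : Int :=
  let n : Int := dictionary.length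
  (((PySem.List.pyRange 0 n 1).foldl (fun (st : Int × Int) i =>
      let temp : Int := (PySem.List.pyRange 0 (PySem.Str.len candidate) 1).foldl
        (fun temp j =>
          if PySem.Str.pyGet? candidate j
              == (PySem.List.pyGet? dictionary i).bind (fun w => PySem.Str.pyGet? w j)
          then temp + 1 else temp) 0
      if temp > st.1 then (temp, i) else st) ((0 : Int), (-1 : Int)))).2

-- ===== PORT B =====
-- Port of Source B's score(w): loop over enumerate(candidate), comparing each character with w[j].
def pvScoreB (w : String) (c : List Char) : Int :=
  (PySem.List.enumerate c 0).foldl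
    (fun s e => if some e.2 == PySem.Str.pyGet? w e.1 then s + 1 else s) 0

-- Port of Source B's best(lo, hi): divide-and-conquer tournament on dictionary[lo:hi].
-- The fuel parameter (≥ hi - lo, supplied as the dictionary length) only makes the structural
-- recursion total; dictionary[lo] is pyGet?, whose none branch is unreachable (lo < hi ≤ len).
def pvBest (dictionary : List String) (c : List Char) : Nat → Nat → Nat → Int × Int
  | 0, _, _ => (-1, 0)
  | fuel + 1, lo, hi =>
    if hi - lo = 0 then (-1, 0)
    else if hi - lo = 1 then
      match PySem.List.pyGet? dictionary (lo : Int) with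
      | some w =>
          let sc := pvScoreB w c
          if sc > 0 then ((lo : Int), sc) else (-1, 0)
      | none => (-1, 0)
    else
      let mid := (lo + hi) / 2
      let l := pvBest dictionary c fuel lo mid
      let r := pvBest dictionary c fuel mid hi
      if l.2 ≥ r.2 then l else r

def selectWord_alt (dictionary : List String) (candidate : String) : Int :=
  (pvBest dictionary candidate.toList dictionary.length 0 dictionary.length).1

-- ===== PRECONDITION & SPEC =====
-- Pre_ excludes exactly the inputs on which Python A raises IndexError: a dictionary word shorter
-- than the candidate (the inner loop indexes every j < len(candidate) into it). B raises there too.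
def Pre_selectWord (dictionary : List String) (candidate : String) : Prop :=
  ∀ w ∈ dictionary, candidate.toList.length ≤ w.toList.length
instance (dictionary : List String) (candidate : String) : Decidable (Pre_selectWord dictionary candidate) := by unfold Pre_selectWord; infer_instance
def pvWitness_selectWord : List String × String := (["hole", "pale", "help"], "hell")

def Spec_selectWord (dictionary : List String) (candidate : String) (out : Int) : Prop := out = selectWord_alt dictionary candidate
instance (dictionary : List String) (candidate : String) (out : Int) : Decidable (Spec_selectWord dictionary candidate out) := by unfold Spec_selectWord; infer_instance

-- ===== CLAIM (what is proved, stated in full; the proofs are below) =====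
def Claim_equal_selectWord : Prop := ∀ (dictionary : List String) (candidate : String), Dom_selectWord dictionary candidate → Pre_selectWord dictionary candidate → Spec_selectWord dictionary candidate (selectWord dictionary candidate)

-- ===== LEMMAS AND PROOFS =====

-- Proof-side head-recursive selector: best (index, score) of a score list with offset k.
def pvSel : List Int → Int → Int × Int
  | [], _ => (-1, 0)
  | t :: r, k => let p := pvSel r (k + 1); if t ≥ p.2 ∧ t > 0 then (k, t) else p

theorem pvSel_inv (L : List Int) (k : Int) :
    0 ≤ (pvSel L k).2 ∧ ((pvSel L k).2 = 0 → (pvSel L k).1 = -1) := by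
  induction L generalizing k with
  | nil => simp [pvSel]
  | cons t r ih =>
    have := ih (k + 1)
    by_cases h : t ≥ (pvSel r (k + 1)).2 ∧ t > 0 <;> simp [pvSel, h] <;> omega

theorem pvSel_append (L1 L2 : List Int) (k : Int) :
    pvSel (L1 ++ L2) k =
      (if (pvSel L1 k).2 ≥ (pvSel L2 (k + L1.length)).2
       then pvSel L1 k else pvSel L2 (k + L1.length)) := by
  induction L1 generalizing k with
  | nil =>
    have := pvSel_inv L2 k
    simp only [List.nil_append, pvSel, List.length_nil]
    rw [show k + (0 : Nat) = k by push_cast; ring]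
    by_cases h : (0 : Int) ≥ (pvSel L2 k).2
    · rw [if_pos h]
      have h0 : (pvSel L2 k).2 = 0 := by omega
      have h1 := this.2 h0
      rw [Prod.ext_iff]; exact ⟨h1, h0⟩
    · rw [if_neg h]
  | cons t r ih =>
    simp only [List.cons_append, pvSel, List.length_cons]
    rw [ih (k + 1),
      show k + 1 + (r.length : Int) = k + ((r.length + 1 : Nat) : Int) by push_cast; ring]
    set a := pvSel r (k + 1) with ha
    set b := pvSel L2 (k + ((r.length + 1 : Nat) : Int)) with hb
    by_cases h1 : a.2 ≥ b.2
    · rw [if_pos h1]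
      by_cases h2 : t ≥ a.2 ∧ t > 0
      · rw [if_pos h2,
          if_pos (show ((k, t) : Int × Int).2 ≥ b.2 by dsimp only; omega)]
      · rw [if_neg h2, if_pos h1]
    · rw [if_neg h1]
      by_cases h2 : t ≥ b.2 ∧ t > 0
      · rw [if_pos h2, if_pos (show t ≥ a.2 ∧ t > 0 by constructor <;> omega),
          if_pos (show ((k, t) : Int × Int).2 ≥ b.2 by dsimp only; omega)]
      · rw [if_neg h2]
        by_cases h3 : t ≥ a.2 ∧ t > 0
        · rw [if_pos h3, if_neg (show ¬ ((k, t) : Int × Int).2 ≥ b.2 by dsimp only; omega)]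
        · rw [if_neg h3, if_neg h1]

-- A's inner temp-loop computes exactly B's score of the word it indexed.
theorem pv_temp_eq_score (w c : String) :
    (PySem.List.pyRange 0 (PySem.Str.len c) 1).foldl
      (fun temp j =>
        if PySem.Str.pyGet? c j == (some w).bind (fun w => PySem.Str.pyGet? w j)
        then temp + 1 else temp) 0
    = pvScoreB w c.toList := by
  unfold pvScoreB
  rw [PySem.List.enumerate_eq_map_pyRange (d := 'a'), List.foldl_map]
  rw [show PySem.List.len c.toList = PySem.Str.len c from by simp [PySem.List.len]]
  apply PySem.List.foldl_congr_mem
  intro acc j hj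
  have hj' := (PySem.List.mem_pyRange_one).mp hj
  simp only [PySem.Str.len_eq] at hj'
  have hbridge : PySem.Chars.pyGet? c.toList j = PySem.List.pyGet? c.toList j := by
    simp [PySem.Chars.pyGet?, PySem.List.pyGet?]
  have : PySem.Str.pyGet? c j = some (PySem.List.pyGetD c.toList j 'a') := by
    simp only [PySem.Str.pyGet?_eq, hbridge]
    rw [PySem.List.pyGet?_eq_some_getElem c.toList hj'.1 (by exact_mod_cast hj'.2),
      PySem.List.pyGetD_eq_getElem (xs := c.toList) (i := j) (d := 'a') hj'.1 (by exact_mod_cast hj'.2)]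
  rw [this]
  simp

-- A's forward running-best fold equals the (swapped) pvSel of the score list.
theorem pv_fold_eq_sel (L : List Int) (k s p : Int) (hs : 0 ≤ s) :
    (PySem.List.enumerate L k).foldl
      (fun (st : Int × Int) e => if e.2 > st.1 then (e.2, e.1) else st) (s, p)
    = (if (pvSel L k).2 > s then ((pvSel L k).2, (pvSel L k).1) else (s, p)) := by
  induction L generalizing k s p with
  | nil =>
    simp only [PySem.List.enumerate_nil, List.foldl_nil, pvSel]
    rw [if_neg (show ¬ ((-1 : Int), (0 : Int)).2 > s by dsimp only; omega)]
  | cons t rest ih =>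
    rw [PySem.List.enumerate_cons, List.foldl_cons]
    simp only [pvSel]
    set pr := pvSel rest (k + 1) with hpr
    by_cases hts : t > s
    · rw [if_pos (show ((k, t) : Int × Int).2 > ((s, p) : Int × Int).1 by dsimp only; omega)]
      rw [ih (k + 1) t k (by omega)]
      by_cases h2 : t ≥ pr.2 ∧ t > 0
      · rw [if_pos h2, if_neg (show ¬ pr.2 > t by omega),
          if_pos (show ((k, t) : Int × Int).2 > s by dsimp only; omega)]
      · have hpt : pr.2 > t := by omega
        rw [if_neg h2, if_pos hpt, if_pos (show pr.2 > s by omega)]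
    · rw [if_neg (show ¬ ((k, t) : Int × Int).2 > ((s, p) : Int × Int).1 by dsimp only; omega)]
      rw [ih (k + 1) s p hs]
      by_cases h2 : t ≥ pr.2 ∧ t > 0
      · rw [if_pos h2, if_neg (show ¬ pr.2 > s by omega),
          if_neg (show ¬ ((k, t) : Int × Int).2 > s by dsimp only; omega)]
      · rw [if_neg h2]

-- pvBest on [lo, hi) equals pvSel on the corresponding slice of the score table.
theorem pvBest_eq_sel (dictionary : List String) (c : List Char) :
    ∀ (fuel lo hi : Nat), hi - lo ≤ fuel → lo ≤ hi → hi ≤ dictionary.length →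
      pvBest dictionary c fuel lo hi
        = pvSel (((dictionary.map (fun w => pvScoreB w c)).drop lo).take (hi - lo)) lo := by
  intro fuel
  induction fuel with
  | zero =>
    intro lo hi h1 h2 h3
    rw [show hi - lo = 0 by omega]
    simp [pvBest, pvSel]
  | succ n ih =>
    intro lo hi h1 h2 h3
    by_cases h0 : hi - lo = 0
    · rw [pvBest, if_pos h0, h0]; simp [pvSel]
    by_cases hone : hi - lo = 1
    · rw [pvBest, if_neg h0, if_pos hone, hone]
      have hlt : lo < dictionary.length := by omega
      have hget : PySem.List.pyGet? dictionary (lo : Int) = some dictionary[lo] :=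
        PySem.List.pyGet?_eq_some_getElem dictionary (by exact_mod_cast Nat.zero_le lo) (by exact_mod_cast hlt)
      rw [hget]
      have hsl : ((dictionary.map (fun w => pvScoreB w c)).drop lo).take 1
          = [pvScoreB dictionary[lo] c] := by
        rw [List.take_one]
        simp [List.head?_drop, hlt]
      rw [hsl]
      simp only [pvSel]
      by_cases hs : pvScoreB dictionary[lo] c > 0
      · rw [if_pos hs, if_pos ⟨by omega, hs⟩]
      · rw [if_neg hs, if_neg (by omega)]
    · rw [pvBest, if_neg h0, if_neg hone]
      simp only []
      have hmidl : lo < (lo + hi) / 2 := by omega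
      have hmidr : (lo + hi) / 2 < hi := by omega
      set mid := (lo + hi) / 2 with hmid
      rw [ih lo mid (by omega) (by omega) (by omega), ih mid hi (by omega) (by omega) h3]
      set scores := dictionary.map (fun w => pvScoreB w c) with hsc
      have hslen : scores.length = dictionary.length := by simp [hsc]
      have hsplit : (scores.drop lo).take (hi - lo)
          = (scores.drop lo).take (mid - lo) ++ (scores.drop mid).take (hi - mid) := by
        rw [show hi - lo = (mid - lo) + (hi - mid) by omega, List.take_add]
        congr 1
        rw [List.drop_drop, show lo + (mid - lo) = mid from by omega]
      rw [hsplit, pvSel_append]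
      have hlen1 : ((scores.drop lo).take (mid - lo)).length = mid - lo := by
        rw [List.length_take, List.length_drop]; omega
      rw [hlen1, show ((lo : Int) + ((mid - lo : Nat) : Int)) = (mid : Int) by
        omega]

theorem selectWord_eq_alt (dictionary : List String) (candidate : String) :
    selectWord dictionary candidate = selectWord_alt dictionary candidate := by
  unfold selectWord selectWord_alt
  simp only []
  set scores := dictionary.map (fun w => pvScoreB w candidate.toList) with hscores
  have hlen : (scores.length : Int) = (dictionary.length : Int) := by simp [hscores]
  have hstep : (PySem.List.pyRange 0 (dictionary.length : Int) 1).foldl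
      (fun (st : Int × Int) i =>
        let temp : Int := (PySem.List.pyRange 0 (PySem.Str.len candidate) 1).foldl
          (fun temp j =>
            if PySem.Str.pyGet? candidate j
                == (PySem.List.pyGet? dictionary i).bind (fun w => PySem.Str.pyGet? w j)
            then temp + 1 else temp) 0
        if temp > st.1 then (temp, i) else st) ((0 : Int), (-1 : Int))
      = (PySem.List.enumerate scores 0).foldl
          (fun (st : Int × Int) e => if e.2 > st.1 then (e.2, e.1) else st) ((0 : Int), (-1 : Int)) := by
    rw [PySem.List.enumerate_eq_map_pyRange (d := 0), List.foldl_map]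
    rw [show PySem.List.len scores = (dictionary.length : Int) from by simp [hscores, PySem.List.len]]
    apply PySem.List.foldl_congr_mem
    intro st i hi
    have hi' := (PySem.List.mem_pyRange_one).mp hi
    have hlt : i.toNat < dictionary.length := by omega
    have hw : PySem.List.pyGet? dictionary i = some dictionary[i.toNat] :=
      PySem.List.pyGet?_eq_some_getElem dictionary hi'.1 (by exact_mod_cast hi'.2)
    have hsc : PySem.List.pyGetD scores i 0 = pvScoreB dictionary[i.toNat] candidate.toList := by
      rw [PySem.List.pyGetD_eq_getElem (xs := scores) (i := i) (d := 0) hi'.1 (by rw [hlen]; exact hi'.2)]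
      simp [hscores]
    rw [hw, hsc]
    rw [pv_temp_eq_score dictionary[i.toNat] candidate]
  rw [hstep, pv_fold_eq_sel scores 0 0 (-1) (le_refl 0)]
  rw [pvBest_eq_sel dictionary candidate.toList dictionary.length 0 dictionary.length
    (by omega) (by omega) (by omega)]
  rw [List.drop_zero, Nat.sub_zero, List.take_of_length_le (by simp), ← hscores,
    Nat.cast_zero]
  have hinv := pvSel_inv scores 0
  by_cases h : (pvSel scores 0).2 > 0
  · rw [if_pos h]
  · rw [if_neg h]
    exact (hinv.2 (by omega)).symm

-- ===== VERDICT (by name: the statement is the Claim_ definition above) =====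
theorem selectWord_spec : Claim_equal_selectWord := by
  intro dictionary candidate _ _
  exact selectWord_eq_alt dictionary candidate
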